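-- pv_equiv track=rewrite | github.com/EmilyKolb/happygolucky | Scrypti.py | modify_timecode
-- ===== SOURCE A (Python) =====
-- def modify_timecode(text):
--
--     ret = ''
--
--     for character in text:
--         if character == "\t":
--             ret += " - "
--         else:
--             ret += character
--
--     return ret
-- ===== SOURCE B (Python) =====
-- def modify_timecode(text):
--     return text.replace("\t", " - ")
-- ===== Notes on version B (the rewrite author's own statement) =====
-- stated objective: faster
-- what changed: replaces the manual character-by-character scan-and-accumulate loop with a single str.replace call
import Mathlib
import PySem

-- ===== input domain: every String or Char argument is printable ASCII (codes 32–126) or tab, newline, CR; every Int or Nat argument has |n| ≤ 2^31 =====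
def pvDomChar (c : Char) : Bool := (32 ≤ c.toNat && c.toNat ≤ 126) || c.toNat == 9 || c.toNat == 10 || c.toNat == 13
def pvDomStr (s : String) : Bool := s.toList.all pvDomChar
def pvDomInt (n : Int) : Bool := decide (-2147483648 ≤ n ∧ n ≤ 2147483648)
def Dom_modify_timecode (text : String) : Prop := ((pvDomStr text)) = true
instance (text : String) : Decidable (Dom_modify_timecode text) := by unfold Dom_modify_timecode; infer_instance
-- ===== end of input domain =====

-- B replaces A's per-character accumulate loop with a single str.replace call (idiomatic).

-- ===== PORT A =====
-- A builds ret character by character, appending " - " for a tab; ret kept as List Char,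
-- converted to String at the end (Lean's String.append is opaque to the kernel).
def modify_timecode (text : String) : String :=
  String.ofList
    (text.toList.foldl
      (fun ret c => if c == '\t' then ret ++ [' ', '-', ' '] else ret ++ [c]) [])

-- ===== PORT B =====
def modify_timecode_alt (text : String) : String :=
  PySem.Str.replace text "\t" " - "

-- ===== PRECONDITION & SPEC =====
def Spec_modify_timecode (text : String) (out : String) : Prop := out = modify_timecode_alt text
instance (text : String) (out : String) : Decidable (Spec_modify_timecode text out) := by unfold Spec_modify_timecode; infer_instance

-- ===== CLAIM (what is proved, stated in full; the proofs are below) =====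
def Claim_equal_modify_timecode : Prop := ∀ (text : String), Dom_modify_timecode text → Spec_modify_timecode text (modify_timecode text)

-- ===== LEMMAS AND PROOFS =====

def pvSeg (c : Char) : List Char := if c == '\t' then [' ', '-', ' '] else [c]

theorem pvFoldl_eq (cs : List Char) (acc : List Char) :
    cs.foldl (fun ret c => if c == '\t' then ret ++ [' ', '-', ' '] else ret ++ [c]) acc
      = acc ++ cs.flatMap pvSeg := by
  induction cs generalizing acc with
  | nil => simp
  | cons c t ih =>
    simp only [List.foldl_cons, List.flatMap_cons, ih, pvSeg]
    by_cases h : c == '\t' <;> simp [h]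

theorem pvReplaceGo_eq (fuel : Nat) (cs acc : List Char) (h : cs.length ≤ fuel) :
    PySem.Chars.replace.go ['\t'] [' ', '-', ' '] fuel cs acc
      = acc.reverse ++ cs.flatMap pvSeg := by
  induction fuel generalizing cs acc with
  | zero =>
    have : cs = [] := List.length_eq_zero_iff.mp (Nat.le_zero.mp h)
    subst this; simp [PySem.Chars.replace.go]
  | succ fuel ih =>
    cases cs with
    | nil => simp [PySem.Chars.replace.go]
    | cons c t =>
      simp only [PySem.Chars.replace.go]
      by_cases hc : c = '\t'
      · subst hc
        have hp : List.isPrefixOf ['\t'] ('\t' :: t) = true := by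
          simp [List.isPrefixOf]
        rw [if_pos hp]
        simp only [List.length_cons] at h
        rw [ih _ _ (by simpa using Nat.le_of_succ_le_succ h)]
        simp [pvSeg]
      · have hp : List.isPrefixOf ['\t'] (c :: t) = false := by
          simp [List.isPrefixOf]; exact fun e => hc e.symm
        rw [if_neg (by simp [hp])]
        simp only [List.length_cons] at h
        rw [ih _ _ (Nat.le_of_succ_le_succ h)]
        simp [pvSeg, hc]

-- ===== VERDICT (by name: the statement is the Claim_ definition above) =====
theorem modify_timecode_spec : Claim_equal_modify_timecode := by
  intro text _
  unfold Spec_modify_timecode modify_timecode modify_timecode_alt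
  rw [pvFoldl_eq]
  simp only [List.nil_append]
  unfold PySem.Str.replace PySem.Chars.replace
  have : ("\t" : String).toList = ['\t'] := by decide
  rw [this]
  have h2 : (" - " : String).toList = [' ', '-', ' '] := by decide
  rw [h2]
  simp only [List.isEmpty_cons, Bool.false_eq_true, if_false]
  rw [pvReplaceGo_eq _ _ _ (Nat.le_refl _)]
  simp
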